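-- pv_equiv track=rewrite | github.com/Berkeley-NLP/Lex-Rules | mt_evaluate.py | compute_prediction
-- ===== SOURCE A (Python) =====
-- def compute_prediction(prediction, label):
--     """
--     Determine if the prediction matches the label.
--
--     Parameters:
--         prediction (str): The predicted label(s), possibly containing multiple labels separated by '/'.
--         label (str): The true label(s), possibly containing multiple labels separated by '/'.
--
--     Returns:
--         int: 1 if there is a match, 0 otherwise.
--     """
--     predictions = prediction.split("/")
--     labels = label.split("/")
--     for pred in predictions:
--         for gold in labels:
--             if pred == gold:
--                 return 1  # Correct prediction
--     return 0  # Incorrect prediction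
-- ===== SOURCE B (Python) =====
-- def compute_prediction(prediction, label):
--     """Return 1 iff the '/'-separated prediction and label token lists overlap.
--
--     Sort both token lists, then walk them in lockstep with two pointers,
--     advancing the pointer at the lexicographically smaller token; any
--     common token must be met head-to-head during the merge."""
--     preds = sorted(prediction.split("/"))
--     golds = sorted(label.split("/"))
--     i = j = 0
--     while i < len(preds) and j < len(golds):
--         if preds[i] == golds[j]:
--             return 1
--         if preds[i] < golds[j]:
--             i += 1
--         else:
--             j += 1
--     return 0
-- ===== Notes on version B (the rewrite author's own statement) =====
-- stated objective: alternative
-- what changed: Replaces A's nested scans with sort-then-merge: both token lists are sorted and scanned once in lockstep with two pointers, advancing the smaller side; a shared token is detected head-to-head.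
import Mathlib
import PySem

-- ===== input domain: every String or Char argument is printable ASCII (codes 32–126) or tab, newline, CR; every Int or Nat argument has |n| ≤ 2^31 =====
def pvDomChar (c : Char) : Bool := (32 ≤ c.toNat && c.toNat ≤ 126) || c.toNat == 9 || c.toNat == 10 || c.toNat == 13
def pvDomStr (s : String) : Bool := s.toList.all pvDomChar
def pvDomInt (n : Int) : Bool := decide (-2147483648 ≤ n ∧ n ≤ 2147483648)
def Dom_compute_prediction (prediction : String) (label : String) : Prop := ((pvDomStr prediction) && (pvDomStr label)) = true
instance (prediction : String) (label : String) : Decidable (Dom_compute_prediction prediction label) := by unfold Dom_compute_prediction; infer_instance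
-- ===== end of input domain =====

-- B replaces A's nested scans by sort-then-merge: both token lists are sorted and
-- scanned once with two pointers (alternative decomposition; same behaviour).


-- ===== PORT A =====
-- inner loop: 'for gold in labels: if pred == gold: return 1'
def cpInner (pred : String) : List String → Bool
  | [] => false
  | g :: gs => if pred = g then true else cpInner pred gs

-- outer loop over predictions, early return 1 on a match, else 0
def cpOuter : List String → List String → Int
  | [], _ => 0
  | p :: ps, ls => if cpInner p ls then 1 else cpOuter ps ls

def compute_prediction (prediction : String) (label : String) : Int :=
  cpOuter ((PySem.Str.split? prediction "/").getD []) ((PySem.Str.split? label "/").getD [])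

-- ===== PORT B =====
-- the two-pointer while loop over the two sorted lists, as structural recursion
def cpMerge : List String → List String → Int
  | [], _ => 0
  | _ :: _, [] => 0
  | a :: as, b :: bs =>
    if a = b then 1
    else if a < b then cpMerge as (b :: bs)
    else cpMerge (a :: as) bs
termination_by xs ys => xs.length + ys.length

def compute_prediction_alt (prediction : String) (label : String) : Int :=
  cpMerge (PySem.List.sorted ((PySem.Str.split? prediction "/").getD []) (fun x => x) false)
          (PySem.List.sorted ((PySem.Str.split? label "/").getD []) (fun x => x) false)

-- ===== PRECONDITION & SPEC =====
def Spec_compute_prediction (prediction : String) (label : String) (out : Int) : Prop := out = compute_prediction_alt prediction label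
instance (prediction : String) (label : String) (out : Int) : Decidable (Spec_compute_prediction prediction label out) := by unfold Spec_compute_prediction; infer_instance

-- ===== CLAIM (what is proved, stated in full; the proofs are below) =====
def Claim_equal_compute_prediction : Prop := ∀ (prediction : String) (label : String), Dom_compute_prediction prediction label → Spec_compute_prediction prediction label (compute_prediction prediction label)

-- ===== LEMMAS AND PROOFS =====
theorem cpInner_eq_true_iff (p : String) (ls : List String) : cpInner p ls = true ↔ p ∈ ls := by
  induction ls with
  | nil => simp [cpInner]
  | cons g gs ih =>
    by_cases h : p = g <;> simp [cpInner, h, ih]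

theorem cpOuter_eq_one_iff (ps ls : List String) : cpOuter ps ls = 1 ↔ ∃ p ∈ ps, p ∈ ls := by
  induction ps with
  | nil => simp [cpOuter]
  | cons p ps ih =>
    by_cases h : cpInner p ls = true
    · simp [cpOuter, h, (cpInner_eq_true_iff p ls).mp h]
    · have hp : p ∉ ls := fun hm => h ((cpInner_eq_true_iff p ls).mpr hm)
      simp [cpOuter, h, ih, hp]

theorem cpOuter_zero_or_one (ps ls : List String) : cpOuter ps ls = 0 ∨ cpOuter ps ls = 1 := by
  induction ps with
  | nil => simp [cpOuter]
  | cons p ps ih =>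
    by_cases h : cpInner p ls = true <;> simp [cpOuter, h, ih]

-- On sorted lists the two-pointer merge finds a common element iff one exists.
theorem cpMerge_eq_one_iff (xs ys : List String)
    (hx : xs.Pairwise (· ≤ ·)) (hy : ys.Pairwise (· ≤ ·)) :
    cpMerge xs ys = 1 ↔ ∃ p ∈ xs, p ∈ ys := by
  fun_induction cpMerge xs ys with
  | case1 ys => simp
  | case2 a as => simp
  | case3 as b bs =>
    exact ⟨fun _ => ⟨b, List.mem_cons_self, List.mem_cons_self⟩, fun _ => rfl⟩
  | case4 a as b bs hne hlt ih =>
    -- a < b ≤ every element of bs, so a ∉ b :: bs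
    have hnb : a ∉ b :: bs := by
      intro hm
      rcases List.mem_cons.mp hm with h | h
      · exact hne h
      · have := (List.pairwise_cons.mp hy).1 a h
        exact absurd (lt_of_lt_of_le hlt this) (lt_irrefl a)
    rw [ih (List.Pairwise.of_cons hx) hy]
    constructor
    · rintro ⟨p, h1, h2⟩; exact ⟨p, List.mem_cons_of_mem _ h1, h2⟩
    · rintro ⟨p, h1, h2⟩
      rcases List.mem_cons.mp h1 with h | h
      · exact absurd (h ▸ h2) hnb
      · exact ⟨p, h, h2⟩
  | case5 a as b bs hne hnlt ih =>
    have hblt : b < a := lt_of_le_of_ne (le_of_not_gt hnlt) (fun h => hne h.symm)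
    have hnb : b ∉ a :: as := by
      intro hm
      rcases List.mem_cons.mp hm with h | h
      · exact hne h.symm
      · have := (List.pairwise_cons.mp hx).1 b h
        exact absurd (lt_of_lt_of_le hblt this) (lt_irrefl b)
    rw [ih hx (List.Pairwise.of_cons hy)]
    constructor
    · rintro ⟨p, h1, h2⟩; exact ⟨p, h1, List.mem_cons_of_mem _ h2⟩
    · rintro ⟨p, h1, h2⟩
      rcases List.mem_cons.mp h2 with h | h
      · exact absurd (h ▸ h1) hnb
      · exact ⟨p, h1, h⟩

theorem cpMerge_zero_or_one (xs ys : List String) : cpMerge xs ys = 0 ∨ cpMerge xs ys = 1 := by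
  fun_induction cpMerge xs ys with
  | case1 ys => simp
  | case2 a as => simp
  | case3 as b bs => simp
  | case4 a as b bs hne hlt ih => exact ih
  | case5 a as b bs hne hnlt ih => exact ih

-- ===== VERDICT (by name: the statement is the Claim_ definition above) =====
theorem compute_prediction_spec : Claim_equal_compute_prediction := by
  intro prediction label _
  unfold Spec_compute_prediction compute_prediction compute_prediction_alt
  set ps := (PySem.Str.split? prediction "/").getD []
  set ls := (PySem.Str.split? label "/").getD []
  set sps := PySem.List.sorted ps (fun x => x) false with hsps
  set sls := PySem.List.sorted ls (fun x => x) false with hsls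
  have hiff : cpOuter ps ls = 1 ↔ cpMerge sps sls = 1 := by
    rw [cpOuter_eq_one_iff,
        cpMerge_eq_one_iff sps sls (PySem.List.sorted_pairwise ps (fun x => x))
          (PySem.List.sorted_pairwise ls (fun x => x))]
    constructor
    · rintro ⟨p, h1, h2⟩
      exact ⟨p, (PySem.List.mem_sorted _ _ _ _).mpr h1, (PySem.List.mem_sorted _ _ _ _).mpr h2⟩
    · rintro ⟨p, h1, h2⟩
      exact ⟨p, (PySem.List.mem_sorted _ _ _ _).mp h1, (PySem.List.mem_sorted _ _ _ _).mp h2⟩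
  rcases cpOuter_zero_or_one ps ls with h0 | h1
  · rcases cpMerge_zero_or_one sps sls with m0 | m1
    · rw [h0, m0]
    · exact absurd (hiff.mpr m1) (by omega)
  · rw [h1, hiff.mp h1]
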